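-- pv_equiv track=rewrite | github.com/nunorgcarvalho/popstatgensim | code/popstatgen/popsim.py | get_closest_path
-- ===== SOURCE A (Python) =====
-- from typing import Tuple, Union, Dict, Optional, List
--
-- PedPath = Tuple[int, ...] # stores chain of meioses up/down, modified from [Williams et al. 2025 Genetics]
--
-- def get_closest_path(paths: Dict, keys: Tuple) -> Tuple[Optional[PedPath], List]:
--     '''
--     Given a dictionary of relationships and a list of keys, returns the closest path among the keys.
--     Parameters:
--         paths (Dict): Dictionary of relationships (paths attribute in a Pedigree object).
--         keys (Tuple): Tuple of keys to check.
--     Returns: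
--         tuple ((closest_path, closest_path_keys)):
--         Where:
--         - closest_path (PedPath): The closest path found among the keys.
--         - closest_path_keys (List): List of keys that correspond to the closest path.
--     '''
--     closest_path = None # PedPath object
--     closest_path_keys = []
--     for key in keys:
--         path = paths.get(key)
--         # skips if pair is unrelated
--         if path is None:
--             continue
--
--         # series of checks to determine if this path is the closest yet
--         if closest_path is None:
--             closest_path = path
--             closest_path_keys = [key]
--             continue
--         # first check: path cannot be longer than closest path so far
--         if len(path) < len(closest_path):
--             closest_path = path
--             closest_path_keys = [key]
--             continue
--         elif len(path) > len(closest_path):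
--             continue
--
--         # second check: path cannot have less (+3) entries than closest path so far
--         if path.count(3) > closest_path.count(3):
--             closest_path = path
--             closest_path_keys = [key]
--             continue
--         elif path.count(3) < closest_path.count(3):
--             continue
--         # third check: path cannot have less (-1) entries than closest path so far
--         if path.count(-1) > closest_path.count(-1):
--             closest_path = path
--             closest_path_keys = [key]
--             continue
--         elif path.count(-1) < closest_path.count(-1):
--             continue
--
--         # if all these checks are passed, we set this as the closest path
--         # if this path is identical to the previously stored closest path, we append the key
--         if path == closest_path:
--             closest_path_keys.append(key)
--         else:
--             closest_path = path
--             closest_path_keys = [key]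
--
--         # # first check: path cannot be longer than closest path so far
--         # if len(path) > len(closest_path):
--         #     continue
--         # # second check: path cannot have less (+3) entries than closest path so far
--         # if path.count(3) < closest_path.count(3):
--         #     continue
--         # # third check: path cannot have less (-1) entries than closest path so far
--         # if path.count(-1) < closest_path.count(-1):
--         #     continue
--         # # if all these checks are passed, we set this as the closest path
--         # # if this path is identical to the previously stored closest path, we append the key
--         # if path == closest_path:
--         #     closest_path_keys.append(key)
--         # else:
--         #     closest_path = path
--         #     closest_path_keys = [key]
--
--     return closest_path, closest_path_keys
-- ===== SOURCE B (Python) =====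
-- def get_closest_path(paths, keys):
--     '''
--     Returns the closest path among the given keys and the keys that share it.
--     Closeness: shortest path first, then most (+3) entries, then most (-1)
--     entries.  When several distinct paths tie at the best rank, the most
--     recently seen one wins and the consecutive keys carrying it are returned.
--     '''
--     def rank(path):
--         return (len(path), -path.count(3), -path.count(-1))
--
--     related = [(key, paths[key]) for key in keys if paths.get(key) is not None]
--     if not related:
--         return None, []
--     best = min(rank(path) for _, path in related)
--     closest_path = None
--     closest_path_keys = []
--     for key, path in related:
--         if rank(path) != best:
--             continue
--         if path != closest_path:
--             closest_path = path
--             closest_path_keys = []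
--         closest_path_keys.append(key)
--     return closest_path, closest_path_keys
-- ===== Notes on version B (the rewrite author's own statement) =====
-- stated objective: alternative
-- what changed: Replaces A's single stateful scan with its six-way cascading compare-and-reset branch chain by a pipeline: build the related (key, path) list, compute the minimal rank (len, -count(3), -count(-1)) with min, and keep the last consecutive group of equal paths at that rank.
import Mathlib
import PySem

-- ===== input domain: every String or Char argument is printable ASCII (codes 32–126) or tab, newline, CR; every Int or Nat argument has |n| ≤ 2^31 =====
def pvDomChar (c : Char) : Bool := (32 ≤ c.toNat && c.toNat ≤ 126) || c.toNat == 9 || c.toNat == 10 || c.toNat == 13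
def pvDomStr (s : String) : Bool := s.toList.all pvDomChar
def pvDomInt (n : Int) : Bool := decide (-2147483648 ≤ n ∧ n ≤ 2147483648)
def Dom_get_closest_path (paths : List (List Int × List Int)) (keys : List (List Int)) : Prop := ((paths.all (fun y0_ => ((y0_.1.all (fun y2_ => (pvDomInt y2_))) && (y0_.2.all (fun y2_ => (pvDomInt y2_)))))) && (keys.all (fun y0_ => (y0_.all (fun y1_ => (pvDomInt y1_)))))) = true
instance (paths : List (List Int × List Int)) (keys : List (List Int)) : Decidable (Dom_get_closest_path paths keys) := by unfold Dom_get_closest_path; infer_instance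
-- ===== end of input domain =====

-- B replaces A's single stateful compare-and-reset scan by a pipeline: related list, min rank, last consecutive group at that rank (alternative decomposition; same cost).

-- ===== PORT A =====
-- paths.get(key): dict as association list, first match
def pvGet (paths : List (List Int × List Int)) (key : List Int) : Option (List Int) :=
  (paths.find? (fun kv => kv.1 == key)).map (·.2)

-- A's loop body for a related (key, path) pair: the literal branch chain
def pvStepA (st : Option (List Int) × List (List Int)) (key path : List Int) :
    Option (List Int) × List (List Int) :=
  match st with
  | (none, _) => (some path, [key])
  | (some cp, ks) =>
    if path.length < cp.length then (some path, [key])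
    else if path.length > cp.length then (some cp, ks)
    else if PySem.List.count path 3 > PySem.List.count cp 3 then (some path, [key])
    else if PySem.List.count path 3 < PySem.List.count cp 3 then (some cp, ks)
    else if PySem.List.count path (-1) > PySem.List.count cp (-1) then (some path, [key])
    else if PySem.List.count path (-1) < PySem.List.count cp (-1) then (some cp, ks)
    else if path == cp then (some cp, ks ++ [key])
    else (some path, [key])

def get_closest_path (paths : List (List Int × List Int)) (keys : List (List Int)) :
    Option (List Int) × List (List Int) :=
  keys.foldl (fun st key =>
    match pvGet paths key with
    | none => st            -- skips if pair is unrelated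
    | some path => pvStepA st key path) (none, [])

-- ===== PORT B =====
-- rank: smaller = closer (shorter, then more 3s, then more -1s)
def pvRank (p : List Int) : Int × Int × Int :=
  ((p.length : Int), -(PySem.List.count p 3 : Int), -(PySem.List.count p (-1) : Int))

-- Python lexicographic '<' on the rank triples
def pvTupLt (a b : Int × Int × Int) : Bool :=
  a.1 < b.1 || (a.1 == b.1 && (a.2.1 < b.2.1 || (a.2.1 == b.2.1 && a.2.2 < b.2.2)))

-- min(...) over a nonempty sequence of ranks (first element as seed)
def pvMinFold (t0 : Int × Int × Int) (ts : List (Int × Int × Int)) : Int × Int × Int :=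
  ts.foldl (fun m t => if pvTupLt t m then t else m) t0

-- B's final loop body: reset on a new path, append the key
def pvRunStep (st : Option (List Int) × List (List Int)) (kp : List Int × List Int) :
    Option (List Int) × List (List Int) :=
  match st with
  | (some q, ks) => if kp.2 == q then (some q, ks ++ [kp.1]) else (some kp.2, [kp.1])
  | (none, _) => (some kp.2, [kp.1])

def get_closest_path_alt (paths : List (List Int × List Int)) (keys : List (List Int)) :
    Option (List Int) × List (List Int) :=
  let related := keys.filterMap (fun key => (pvGet paths key).map (fun p => (key, p)))
  match related with
  | [] => (none, [])
  | (_, p0) :: rest =>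
    let best := pvMinFold (pvRank p0) (rest.map (fun kp => pvRank kp.2))
    (related.filter (fun kp => pvRank kp.2 == best)).foldl pvRunStep (none, [])

-- ===== PRECONDITION & SPEC =====
def Spec_get_closest_path (paths : List (List Int × List Int)) (keys : List (List Int)) (out : Option (List Int) × List (List Int)) : Prop := out = get_closest_path_alt paths keys
instance (paths : List (List Int × List Int)) (keys : List (List Int)) (out : Option (List Int) × List (List Int)) : Decidable (Spec_get_closest_path paths keys out) := by unfold Spec_get_closest_path; infer_instance

-- ===== CLAIM (what is proved, stated in full; the proofs are below) =====
def Claim_equal_get_closest_path : Prop := ∀ (paths : List (List Int × List Int)) (keys : List (List Int)), Dom_get_closest_path paths keys → Spec_get_closest_path paths keys (get_closest_path paths keys)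

-- ===== LEMMAS AND PROOFS =====

-- order facts about pvTupLt
theorem pvTupLt_irrefl (a : Int × Int × Int) : pvTupLt a a = false := by
  obtain ⟨a1, a2, a3⟩ := a
  simp [pvTupLt]

theorem pvTupLt_total (a b : Int × Int × Int) (h1 : pvTupLt a b = false)
    (h2 : pvTupLt b a = false) : a = b := by
  obtain ⟨a1, a2, a3⟩ := a; obtain ⟨b1, b2, b3⟩ := b
  simp [pvTupLt] at h1 h2
  have : a1 = b1 ∧ a2 = b2 ∧ a3 = b3 := by omega
  simp [this.1, this.2.1, this.2.2]

theorem pvTupLt_le_trans (a b c : Int × Int × Int) (h1 : pvTupLt b a = false)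
    (h2 : pvTupLt c b = false) : pvTupLt c a = false := by
  obtain ⟨a1, a2, a3⟩ := a; obtain ⟨b1, b2, b3⟩ := b; obtain ⟨c1, c2, c3⟩ := c
  simp [pvTupLt] at *
  omega

theorem pvTupLt_lt_le (a b m : Int × Int × Int) (h1 : pvTupLt a b = true)
    (h2 : pvTupLt a m = false) : pvTupLt b m = false := by
  obtain ⟨a1, a2, a3⟩ := a; obtain ⟨b1, b2, b3⟩ := b; obtain ⟨m1, m2, m3⟩ := m
  simp [pvTupLt] at *
  omega

-- the min fold is a lower bound on the seed and every element
theorem pvMinFold_lb (ts : List (Int × Int × Int)) (t0 : Int × Int × Int) :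
    pvTupLt t0 (pvMinFold t0 ts) = false ∧
      ∀ t ∈ ts, pvTupLt t (pvMinFold t0 ts) = false := by
  induction ts generalizing t0 with
  | nil => exact ⟨pvTupLt_irrefl t0, by simp⟩
  | cons t ts ih =>
    have step : pvMinFold t0 (t :: ts) = pvMinFold (if pvTupLt t t0 = true then t else t0) ts := by
      simp [pvMinFold]
    by_cases hlt : pvTupLt t t0 = true
    · rw [step, if_pos hlt]
      obtain ⟨h1, h2⟩ := ih t
      refine ⟨pvTupLt_lt_le t t0 (pvMinFold t ts) hlt h1, fun u hu => ?_⟩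
      rcases List.mem_cons.mp hu with rfl | hu
      · exact h1
      · exact h2 u hu
    · have hlf : pvTupLt t t0 = false := by simpa using hlt
      rw [step, if_neg hlt]
      obtain ⟨h1, h2⟩ := ih t0
      refine ⟨h1, fun u hu => ?_⟩
      rcases List.mem_cons.mp hu with rfl | hu
      · exact pvTupLt_le_trans (pvMinFold t0 ts) t0 u h1 hlf
      · exact h2 u hu

theorem pvMinFold_append (t0 : Int × Int × Int) (ts : List (Int × Int × Int))
    (t : Int × Int × Int) :
    pvMinFold t0 (ts ++ [t]) = if pvTupLt t (pvMinFold t0 ts) then t else pvMinFold t0 ts := by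
  simp [pvMinFold, List.foldl_append]

-- the rank order spelled out through A's comparisons
theorem rankLt_iff (p cp : List Int) :
    pvTupLt (pvRank p) (pvRank cp) = true ↔
      (p.length < cp.length ∨ (p.length = cp.length ∧
        (PySem.List.count p 3 > PySem.List.count cp 3 ∨
          (PySem.List.count p 3 = PySem.List.count cp 3 ∧
            PySem.List.count p (-1) > PySem.List.count cp (-1))))) := by
  simp only [pvTupLt, pvRank, Bool.or_eq_true, Bool.and_eq_true, decide_eq_true_eq, beq_iff_eq]
  omega

-- A's step on a related pair, expressed through the rank order
theorem stepA_rank (cp : List Int) (ks : List (List Int)) (k p : List Int) :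
    pvStepA (some cp, ks) k p =
      if pvTupLt (pvRank p) (pvRank cp) then (some p, [k])
      else if pvTupLt (pvRank cp) (pvRank p) then (some cp, ks)
      else if p == cp then (some cp, ks ++ [k]) else (some p, [k]) := by
  simp only [pvStepA]
  by_cases h1 : p.length < cp.length
  · rw [if_pos h1, if_pos ((rankLt_iff p cp).mpr (Or.inl h1))]
  · rw [if_neg h1]
    by_cases h2 : p.length > cp.length
    · rw [if_pos h2, if_neg (by rw [rankLt_iff]; omega),
        if_pos ((rankLt_iff cp p).mpr (Or.inl h2))]
    · rw [if_neg h2]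
      have hlen : p.length = cp.length := by omega
      by_cases h3 : PySem.List.count p 3 > PySem.List.count cp 3
      · rw [if_pos h3, if_pos ((rankLt_iff p cp).mpr (Or.inr ⟨hlen, Or.inl h3⟩))]
      · rw [if_neg h3]
        by_cases h4 : PySem.List.count p 3 < PySem.List.count cp 3
        · rw [if_pos h4, if_neg (by rw [rankLt_iff]; omega),
            if_pos ((rankLt_iff cp p).mpr (Or.inr ⟨hlen.symm, Or.inl h4⟩))]
        · rw [if_neg h4]
          have hc3 : PySem.List.count p 3 = PySem.List.count cp 3 := by omega
          by_cases h5 : PySem.List.count p (-1) > PySem.List.count cp (-1)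
          · rw [if_pos h5,
              if_pos ((rankLt_iff p cp).mpr (Or.inr ⟨hlen, Or.inr ⟨hc3, h5⟩⟩))]
          · rw [if_neg h5]
            by_cases h6 : PySem.List.count p (-1) < PySem.List.count cp (-1)
            · rw [if_pos h6, if_neg (by rw [rankLt_iff]; omega),
                if_pos ((rankLt_iff cp p).mpr (Or.inr ⟨hlen.symm, Or.inr ⟨hc3.symm, h6⟩⟩))]
            · rw [if_neg h6,
                if_neg (show ¬(pvTupLt (pvRank p) (pvRank cp) = true) by
                  rw [rankLt_iff]; omega),
                if_neg (show ¬(pvTupLt (pvRank cp) (pvRank p) = true) by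
                  rw [rankLt_iff]; omega)]

-- the A-side fold over keys equals the fold of pvStepA over the related list
theorem foldA_related (paths : List (List Int × List Int)) (keys : List (List Int))
    (st : Option (List Int) × List (List Int)) :
    keys.foldl (fun st key =>
        match pvGet paths key with
        | none => st
        | some path => pvStepA st key path) st =
      (keys.filterMap (fun key => (pvGet paths key).map (fun p => (key, p)))).foldl
        (fun st kp => pvStepA st kp.1 kp.2) st := by
  induction keys generalizing st with
  | nil => rfl
  | cons key keys ih =>
    cases h : pvGet paths key with
    | none => simp [List.foldl_cons, h, ih]
    | some p => simp [List.foldl_cons, h, ih]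

-- main invariant: for a nonempty related list, A's fold equals B's filter-then-group fold
theorem main_inv (x : List Int × List Int) (l : List (List Int × List Int)) :
    ∃ cp ks,
      ((x :: l).filter
          (fun kp => pvRank kp.2 == pvMinFold (pvRank x.2) (l.map (fun kp => pvRank kp.2)))).foldl
            pvRunStep (none, []) = (some cp, ks) ∧
      pvRank cp = pvMinFold (pvRank x.2) (l.map (fun kp => pvRank kp.2)) ∧
      (x :: l).foldl (fun st kp => pvStepA st kp.1 kp.2) (none, []) = (some cp, ks) := by
  induction l using List.reverseRecOn with
  | nil =>
    refine ⟨x.2, [x.1], ?_, by simp [pvMinFold], ?_⟩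
    · simp [pvMinFold, List.filter, pvRunStep]
    · simp [pvStepA]
  | append_singleton l y ih =>
    obtain ⟨cp, ks, hg, ht, hf⟩ := ih
    set best := pvMinFold (pvRank x.2) (l.map (fun kp => pvRank kp.2)) with hbest
    have hmin : pvMinFold (pvRank x.2) ((l ++ [y]).map (fun kp => pvRank kp.2))
        = if pvTupLt (pvRank y.2) best then pvRank y.2 else best := by
      rw [List.map_append, List.map_cons, List.map_nil, pvMinFold_append]
    have hlb := pvMinFold_lb (l.map (fun kp => pvRank kp.2)) (pvRank x.2)
    have hconsapp : x :: (l ++ [y]) = (x :: l) ++ [y] := by simp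
    have hfstep : ((x :: l) ++ [y]).foldl (fun st kp => pvStepA st kp.1 kp.2) (none, [])
        = pvStepA (some cp, ks) y.1 y.2 := by
      rw [List.foldl_append, hf]; rfl
    by_cases hcase : pvTupLt (pvRank y.2) best = true
    · -- strictly better rank: everything resets to y
      have hnone : ∀ kp ∈ x :: l, ¬(pvRank kp.2 == pvRank y.2) = true := by
        intro kp hkp heq
        have hle : pvTupLt (pvRank kp.2) best = false := by
          rcases List.mem_cons.mp hkp with rfl | hkp
          · exact hlb.1
          · exact hlb.2 _ (List.mem_map_of_mem hkp)
        rw [beq_iff_eq] at heq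
        rw [heq] at hle
        exact absurd hcase (by simp [hle])
      refine ⟨y.2, [y.1], ?_, ?_, ?_⟩
      · rw [hconsapp, hmin, if_pos hcase, List.filter_append,
          List.filter_eq_nil_iff.mpr hnone]
        simp [pvRunStep]
      · rw [hmin, if_pos hcase]
      · rw [hconsapp, hfstep, stepA_rank, ht, if_pos hcase]
    · have hcf : pvTupLt (pvRank y.2) best = false := by simpa using hcase
      have hfilter : ((x :: l) ++ [y]).filter (fun kp => pvRank kp.2 == best)
          = ((x :: l).filter (fun kp => pvRank kp.2 == best))
              ++ (if pvRank y.2 == best then [y] else []) := by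
        rw [List.filter_append]
        congr 1
        by_cases hyb : (pvRank y.2 == best) = true
        · simp [List.filter, hyb]
        · simp only [List.filter, hyb]; simp at hyb; simp
      by_cases heq : pvRank y.2 = best
      · -- same rank: y joins (or starts) the last group
        have hstep : pvStepA (some cp, ks) y.1 y.2
            = if y.2 == cp then (some cp, ks ++ [y.1]) else (some y.2, [y.1]) := by
          rw [stepA_rank, ht,
            if_neg (by rw [heq, pvTupLt_irrefl]; simp),
            if_neg (by rw [heq, pvTupLt_irrefl]; simp)]
        refine ⟨if y.2 == cp then cp else y.2, if y.2 == cp then ks ++ [y.1] else [y.1],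
          ?_, ?_, ?_⟩
        · rw [hconsapp, hmin, if_neg hcase, hfilter, if_pos (by simp [heq]),
            List.foldl_append, hg]
          by_cases hpy : (y.2 == cp) = true
          · simp [pvRunStep, hpy]
          · simp [List.foldl_cons, List.foldl_nil, pvRunStep, hpy]
        · rw [hmin, if_neg hcase]
          by_cases hpy : (y.2 == cp) = true
          · rw [if_pos hpy]; exact ht
          · rw [if_neg hpy]; exact heq
        · rw [hconsapp, hfstep, hstep]
          by_cases hpy : (y.2 == cp) = true
          · rw [if_pos hpy, if_pos hpy, if_pos hpy]
          · rw [if_neg hpy, if_neg hpy, if_neg hpy]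
      · -- strictly worse rank: y is skipped everywhere
        have hgt : pvTupLt best (pvRank y.2) = true := by
          by_contra hc
          exact heq (pvTupLt_total _ _ hcf (by simpa using hc))
        refine ⟨cp, ks, ?_, ?_, ?_⟩
        · rw [hconsapp, hmin, if_neg hcase, hfilter,
            if_neg (by simp [heq]), List.append_nil, hg]
        · rw [hmin, if_neg hcase]; exact ht
        · rw [hconsapp, hfstep, stepA_rank, ht]
          rw [if_neg (by simp [hcf]), if_pos hgt]

-- ===== VERDICT (by name: the statement is the Claim_ definition above) =====
theorem get_closest_path_spec : Claim_equal_get_closest_path := by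
  intro paths keys _
  show get_closest_path paths keys = get_closest_path_alt paths keys
  unfold get_closest_path get_closest_path_alt
  rw [foldA_related]
  cases h : keys.filterMap (fun key => (pvGet paths key).map (fun p => (key, p))) with
  | nil => simp
  | cons x l =>
    obtain ⟨cp, ks, hg, _, hf⟩ := main_inv x l
    simp only [hf, hg]
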